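-- pv_equiv track=rewrite | github.com/leonprofess1-pixel/STUDY_PYTHON | 2급 Python_기본/Python 2급 기본_02.py | solution
-- ===== SOURCE A (Python) =====
-- def solution(watering_can, N, M):
--
--     NO_WATER = 0
--     WATER = 1
--
--     garden = [[NO_WATER] * N for i in range(N)]
--
--     for i in range(M) :
--         can = watering_can[i]
--         garden[can[0]][can[1]] = WATER
--         for j in range(1,can[2]):
--             if can[0]+j < N:
--                 garden[can[0]+j][can[1]] = WATER
--             if can[0]-j >= 0:
--                 garden[can[0]-j][can[1]] = WATER
--             if can[1]+j < N:
--                 garden[can[0]][can[1]+j] = WATER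
--             if can[1]-j >= 0:
--                 garden[can[0]][can[1]-j] = WATER
--
--     answer = 0
--
--     for i in range(N):
--         for j in range(N):
--             if garden[i][j] == NO_WATER:
--                 answer += 1
--
--     return answer
-- ===== SOURCE B (Python) =====
-- def solution(watering_can, N, M):
--     # Per-cell test against a closed-form plus-shape condition: no grid, no marking.
--     def covered(i, j):
--         for k in range(M):
--             can = watering_can[k]
--             r, c, d = can[0], can[1], max(can[2] - 1, 0)
--             if (j == c and abs(i - r) <= d) or (i == r and abs(j - c) <= d):
--                 return True
--         return False
--     return sum(1 for i in range(N) for j in range(N) if not covered(i, j))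
-- ===== Notes on version B (the rewrite author's own statement) =====
-- stated objective: simpler
-- what changed: Inverts the computation: instead of allocating an N x N grid, marking every can's plus shape cell-by-cell with an arm loop and four guarded writes, and then rescanning the whole grid, B tests each cell once against a closed-form plus-shape condition (same column within max(len-1,0) rows of a center, or same row within that many columns), with no grid, no marking loop and no mutation.
-- outside the precondition, e.g. on solution([[-1, 0, 2]], 2, 1): A returns 1, B returns 3
import Mathlib
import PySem

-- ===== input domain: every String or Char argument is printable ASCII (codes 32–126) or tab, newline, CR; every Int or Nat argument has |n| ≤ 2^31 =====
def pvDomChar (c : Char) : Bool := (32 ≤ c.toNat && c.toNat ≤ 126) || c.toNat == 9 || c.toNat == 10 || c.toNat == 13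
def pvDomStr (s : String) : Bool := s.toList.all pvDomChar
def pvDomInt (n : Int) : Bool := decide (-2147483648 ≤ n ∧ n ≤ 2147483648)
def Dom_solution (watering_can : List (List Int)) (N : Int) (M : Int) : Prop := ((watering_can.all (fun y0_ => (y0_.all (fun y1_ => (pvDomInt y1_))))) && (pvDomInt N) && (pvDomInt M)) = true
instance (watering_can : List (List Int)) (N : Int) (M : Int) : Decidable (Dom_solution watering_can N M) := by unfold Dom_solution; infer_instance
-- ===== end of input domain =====

-- B replaces A's mark-then-scan grid algorithm by a direct per-cell test against a
-- closed-form plus-shape condition (simpler: no grid, no marking loop, no mutation).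

-- ===== PORT A =====
-- garden[r][c] = v  (Python list assignment; exact under in-range indices, which Pre_ guarantees)
def pvSetCell (g : List (List Int)) (r c v : Int) : List (List Int) :=
  PySem.List.pySetD g r (PySem.List.pySetD (PySem.List.pyGetD g r []) c v)

-- one iteration of A's inner loop (the four guarded arm writes for a given j)
def pvArmA (N r c : Int) (g : List (List Int)) (j : Int) : List (List Int) :=
  let g := if r + j < N then pvSetCell g (r + j) c 1 else g
  let g := if 0 ≤ r - j then pvSetCell g (r - j) c 1 else g
  let g := if c + j < N then pvSetCell g r (c + j) 1 else g
  if 0 ≤ c - j then pvSetCell g r (c - j) 1 else g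

-- body of A's outer loop for one can: the center write, then the inner loop over j
def pvCanStepA (N : Int) (g : List (List Int)) (can : List Int) : List (List Int) :=
  (PySem.List.pyRange 1 (PySem.List.pyGetD can 2 0) 1).foldl
    (pvArmA N (PySem.List.pyGetD can 0 0) (PySem.List.pyGetD can 1 0))
    (pvSetCell g (PySem.List.pyGetD can 0 0) (PySem.List.pyGetD can 1 0) 1)

def solution (watering_can : List (List Int)) (N : Int) (M : Int) : Int :=
  let garden : List (List Int) :=
    List.replicate N.toNat (List.replicate N.toNat (0 : Int))
  let garden := (PySem.List.pyRange 0 M 1).foldl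
    (fun g i => pvCanStepA N g (PySem.List.pyGetD watering_can i [])) garden
  (PySem.List.pyRange 0 N 1).foldl (fun a i =>
    (PySem.List.pyRange 0 N 1).foldl (fun a j =>
      if PySem.List.pyGetD (PySem.List.pyGetD garden i []) j 0 == 0 then a + 1 else a) a) 0

-- ===== PORT B =====
def solution_alt (watering_can : List (List Int)) (N : Int) (M : Int) : Int :=
  -- covered(i, j): the early-return for-loop over range(M) is List.any
  let covered : Int → Int → Bool := fun i j =>
    (PySem.List.pyRange 0 M 1).any (fun k =>
      let can := PySem.List.pyGetD watering_can k []
      let r := PySem.List.pyGetD can 0 0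
      let c := PySem.List.pyGetD can 1 0
      let d := max (PySem.List.pyGetD can 2 0 - 1) 0
      decide ((j = c ∧ |i - r| ≤ d) ∨ (i = r ∧ |j - c| ≤ d)))
  (PySem.List.pyRange 0 N 1).foldl (fun a i =>
    (PySem.List.pyRange 0 N 1).foldl (fun a j =>
      if covered i j then a else a + 1) a) 0

-- ===== PRECONDITION & SPEC =====
-- Pre_ restricts to the task's natural domain: each used can has at least three entries
-- and its center inside the grid [0,N)×[0,N), and M ≤ len(watering_can).  It excludes
-- inputs on which A still returns: can centers in [-N,0), where A's unguarded list
-- assignment wraps to the opposite edge (Python negative indexing, an artefact of the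
-- grid representation); centers ≥ N or < -N, and M > len(watering_can), make A raise
-- IndexError.
def Pre_solution (watering_can : List (List Int)) (N : Int) (M : Int) : Prop :=
  M ≤ (watering_can.length : Int) ∧
  ∀ can ∈ watering_can.take M.toNat,
    3 ≤ can.length ∧
    0 ≤ PySem.List.pyGetD can 0 0 ∧ PySem.List.pyGetD can 0 0 < N ∧
    0 ≤ PySem.List.pyGetD can 1 0 ∧ PySem.List.pyGetD can 1 0 < N
instance (watering_can : List (List Int)) (N : Int) (M : Int) : Decidable (Pre_solution watering_can N M) := by unfold Pre_solution; infer_instance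

def pvWitness_solution : List (List Int) × Int × Int := ([[0, 0, 2]], 2, 1)

def Spec_solution (watering_can : List (List Int)) (N : Int) (M : Int) (out : Int) : Prop := out = solution_alt watering_can N M
instance (watering_can : List (List Int)) (N : Int) (M : Int) (out : Int) : Decidable (Spec_solution watering_can N M out) := by unfold Spec_solution; infer_instance

-- ===== CLAIM (what is proved, stated in full; the proofs are below) =====
def Claim_equal_solution : Prop := ∀ (watering_can : List (List Int)) (N : Int) (M : Int), Dom_solution watering_can N M → Pre_solution watering_can N M → Spec_solution watering_can N M (solution watering_can N M)

-- ===== LEMMAS AND PROOFS =====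

-- the coupling invariant: grid g represents the Boolean cell predicate P on [0,N)×[0,N)
def pvRepr (N : Int) (g : List (List Int)) (P : Int → Int → Bool) : Prop :=
  g.length = N.toNat ∧ (∀ row ∈ g, row.length = N.toNat) ∧
  ∀ r c : Int, 0 ≤ r → r < N → 0 ≤ c → c < N →
    PySem.List.pyGetD (PySem.List.pyGetD g r []) c 0 = if P r c then 1 else 0

lemma pvRepr_congr (N : Int) (g : List (List Int)) (P P' : Int → Int → Bool)
    (h : pvRepr N g P) (he : ∀ i j, P i j = P' i j) : pvRepr N g P' := by
  obtain ⟨h1, h2, h3⟩ := h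
  exact ⟨h1, h2, fun r c a b d e => by rw [h3 r c a b d e, he]⟩

lemma pvRepr_init (N : Int) :
    pvRepr N (List.replicate N.toNat (List.replicate N.toNat (0 : Int))) (fun _ _ => false) := by
  refine ⟨by simp, ?_, ?_⟩
  · intro row hrow
    rw [List.eq_of_mem_replicate hrow]; simp
  · intro r c hr0 hrN hc0 hcN
    have h1 : r < ((List.replicate N.toNat (List.replicate N.toNat (0 : Int))).length : Int) := by
      simp; omega
    rw [PySem.List.pyGetD_eq_getElem _ _ hr0 h1, List.getElem_replicate]
    have h2 : c < ((List.replicate N.toNat (0 : Int)).length : Int) := by simp; omega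
    rw [PySem.List.pyGetD_eq_getElem _ _ hc0 h2, List.getElem_replicate]
    simp

lemma pvRepr_set (N : Int) (g : List (List Int)) (P : Int → Int → Bool)
    (h : pvRepr N g P) (r c : Int) (hr0 : 0 ≤ r) (hrN : r < N) (hc0 : 0 ≤ c) (hcN : c < N) :
    pvRepr N (pvSetCell g r c 1) (fun i j => P i j || (decide (i = r) && decide (j = c))) := by
  obtain ⟨hlen, hrows, hcell⟩ := h
  have hrg : r < (g.length : Int) := by omega
  have hrow : PySem.List.pyGetD g r [] ∈ g :=
    PySem.List.pyGetD_mem g [] (by exact ⟨by omega, by omega⟩)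
  have hrowlen : (PySem.List.pyGetD g r []).length = N.toNat := hrows _ hrow
  have hset : pvSetCell g r c 1
      = g.set r.toNat ((PySem.List.pyGetD g r []).set c.toNat 1) := by
    unfold pvSetCell
    rw [PySem.List.pySetD_of_nonneg _ _ hr0, PySem.List.pySetD_of_nonneg _ _ hc0]
  refine ⟨?_, ?_, ?_⟩
  · rw [hset]; simpa using hlen
  · intro row hrow'
    rw [hset] at hrow'
    rcases List.mem_or_eq_of_mem_set hrow' with h' | h'
    · exact hrows _ h'
    · rw [h']; simpa using hrowlen
  · intro r' c' hr0' hrN' hc0' hcN'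
    rw [hset]
    have hg'len : r' < ((g.set r.toNat ((PySem.List.pyGetD g r []).set c.toNat 1)).length : Int) := by
      simp; omega
    rw [PySem.List.pyGetD_eq_getElem _ _ hr0' hg'len, List.getElem_set]
    by_cases hre : r.toNat = r'.toNat
    · have hre' : r' = r := by omega
      simp only [if_pos hre]
      have hc'len : c' < (((PySem.List.pyGetD g r []).set c.toNat 1).length : Int) := by
        simp [hrowlen]; omega
      rw [PySem.List.pyGetD_eq_getElem _ _ hc0' hc'len, List.getElem_set]
      by_cases hce : c.toNat = c'.toNat
      · have hce' : c' = c := by omega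
        simp [hre', hce']
      · have hce' : c' ≠ c := by omega
        have hget : (PySem.List.pyGetD g r [])[c'.toNat]
            = PySem.List.pyGetD (PySem.List.pyGetD g r []) c' 0 := by
          rw [PySem.List.pyGetD_eq_getElem _ _ hc0' (by omega)]
        rw [if_neg hce, hget, hcell r c' hr0 hrN hc0' hcN']
        simp [hre', hce']
    · have hre' : r' ≠ r := by omega
      have hget : g[r'.toNat] = PySem.List.pyGetD g r' [] := by
        rw [PySem.List.pyGetD_eq_getElem _ _ hr0' (by omega)]
      rw [if_neg hre, hget, hcell r' c' hr0' hrN' hc0' hcN']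
      simp [hre']

lemma pvRepr_condSet (N : Int) (Q : Prop) [Decidable Q] (g : List (List Int))
    (P : Int → Int → Bool) (h : pvRepr N g P) (r c : Int)
    (hQ : Q → 0 ≤ r ∧ r < N ∧ 0 ≤ c ∧ c < N) :
    pvRepr N (if Q then pvSetCell g r c 1 else g)
      (fun i j => P i j || (decide Q && decide (i = r) && decide (j = c))) := by
  split_ifs with hq
  · obtain ⟨a, b, d, e⟩ := hQ hq
    exact pvRepr_congr N _ _ _ (pvRepr_set N g P h r c a b d e) (fun i j => by simp [hq])
  · exact pvRepr_congr N _ _ _ h (fun i j => by simp [hq])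

-- which cells one arm-iteration j writes (A's four guarded writes)
def pvArmHit (N r c jj i j : Int) : Bool :=
  (decide (r + jj < N) && decide (i = r + jj) && decide (j = c)) ||
  (decide (0 ≤ r - jj) && decide (i = r - jj) && decide (j = c)) ||
  (decide (c + jj < N) && decide (i = r) && decide (j = c + jj)) ||
  (decide (0 ≤ c - jj) && decide (i = r) && decide (j = c - jj))

lemma pvRepr_arm (N r c : Int) (hr0 : 0 ≤ r) (hrN : r < N) (hc0 : 0 ≤ c) (hcN : c < N)
    (jj : Int) (hj : 1 ≤ jj) (g : List (List Int)) (P : Int → Int → Bool) (h : pvRepr N g P) :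
    pvRepr N (pvArmA N r c g jj) (fun i j => P i j || pvArmHit N r c jj i j) := by
  unfold pvArmA
  dsimp only
  refine pvRepr_congr N _ _ _
    (pvRepr_condSet N _ _ _
      (pvRepr_condSet N _ _ _
        (pvRepr_condSet N _ _ _
          (pvRepr_condSet N _ _ _ h (r + jj) c (fun hp => ⟨by omega, hp, hc0, hcN⟩))
          (r - jj) c (fun hp => ⟨hp, by omega, hc0, hcN⟩))
        r (c + jj) (fun hp => ⟨hr0, hrN, by omega, hp⟩))
      r (c - jj) (fun hp => ⟨hr0, hrN, hp, by omega⟩))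
    (fun i j => by simp [pvArmHit, Bool.or_assoc])

-- which cells the whole arm loop writes
def pvAnyHit (N r c : Int) (js : List Int) (i j : Int) : Bool :=
  js.any (fun jj => pvArmHit N r c jj i j)

lemma pvRepr_foldArm (N r c : Int) (hr0 : 0 ≤ r) (hrN : r < N) (hc0 : 0 ≤ c) (hcN : c < N)
    (js : List Int) (hjs : ∀ jj ∈ js, 1 ≤ jj) :
    ∀ g P, pvRepr N g P →
      pvRepr N (js.foldl (pvArmA N r c) g) (fun i j => P i j || pvAnyHit N r c js i j) := by
  induction js with
  | nil =>
      intro g P h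
      exact pvRepr_congr N _ _ _ h (fun i j => by simp [pvAnyHit])
  | cons jj t ih =>
      intro g P h
      simp only [List.foldl_cons]
      refine pvRepr_congr N _ _ _
        (ih (fun x hx => hjs x (by simp [hx])) _ _
          (pvRepr_arm N r c hr0 hrN hc0 hcN jj (hjs jj (by simp)) g P h))
        (fun i j => by simp [pvAnyHit, Bool.or_assoc])

-- which cells one can waters: the center plus the arm loop
def pvCanHit (N : Int) (can : List Int) (i j : Int) : Bool :=
  (decide (i = PySem.List.pyGetD can 0 0) && decide (j = PySem.List.pyGetD can 1 0)) ||
  pvAnyHit N (PySem.List.pyGetD can 0 0) (PySem.List.pyGetD can 1 0)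
    (PySem.List.pyRange 1 (PySem.List.pyGetD can 2 0) 1) i j

lemma pvRepr_canStep (N : Int) (g : List (List Int)) (P : Int → Int → Bool)
    (h : pvRepr N g P) (can : List Int)
    (hr0 : 0 ≤ PySem.List.pyGetD can 0 0) (hrN : PySem.List.pyGetD can 0 0 < N)
    (hc0 : 0 ≤ PySem.List.pyGetD can 1 0) (hcN : PySem.List.pyGetD can 1 0 < N) :
    pvRepr N (pvCanStepA N g can) (fun i j => P i j || pvCanHit N can i j) := by
  unfold pvCanStepA
  refine pvRepr_congr N _ _ _
    (pvRepr_foldArm N _ _ hr0 hrN hc0 hcN _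
      (fun jj hjj => (PySem.List.mem_pyRange_one.1 hjj).1) _ _
      (pvRepr_set N g P h _ _ hr0 hrN hc0 hcN))
    (fun i j => by simp [pvCanHit, Bool.or_assoc])

lemma pvRepr_foldCans (wc : List (List Int)) (N : Int) (l : List Int)
    (hl : ∀ i ∈ l,
      0 ≤ PySem.List.pyGetD (PySem.List.pyGetD wc i []) 0 0 ∧
      PySem.List.pyGetD (PySem.List.pyGetD wc i []) 0 0 < N ∧
      0 ≤ PySem.List.pyGetD (PySem.List.pyGetD wc i []) 1 0 ∧
      PySem.List.pyGetD (PySem.List.pyGetD wc i []) 1 0 < N) :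
    ∀ g P, pvRepr N g P →
      pvRepr N (l.foldl (fun g i => pvCanStepA N g (PySem.List.pyGetD wc i [])) g)
        (fun i j => P i j || l.any (fun k => pvCanHit N (PySem.List.pyGetD wc k []) i j)) := by
  induction l with
  | nil =>
      intro g P h
      exact pvRepr_congr N _ _ _ h (fun i j => by simp)
  | cons k t ih =>
      intro g P h
      simp only [List.foldl_cons]
      obtain ⟨h1, h2, h3, h4⟩ := hl k (by simp)
      refine pvRepr_congr N _ _ _
        (ih (fun x hx => hl x (by simp [hx])) _ _ (pvRepr_canStep N g P h _ h1 h2 h3 h4))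
        (fun i j => by simp [Bool.or_assoc])

-- the closed-form plus-shape condition equals A's guarded-writes coverage, per can
lemma pvCanHit_closed (N : Int) (can : List Int) (i j : Int)
    (hi0 : 0 ≤ i) (hiN : i < N) (hj0 : 0 ≤ j) (hjN : j < N)
    (hr0 : 0 ≤ PySem.List.pyGetD can 0 0) (hrN : PySem.List.pyGetD can 0 0 < N)
    (hc0 : 0 ≤ PySem.List.pyGetD can 1 0) (hcN : PySem.List.pyGetD can 1 0 < N) :
    pvCanHit N can i j
      = decide ((j = PySem.List.pyGetD can 1 0 ∧
          |i - PySem.List.pyGetD can 0 0| ≤ max (PySem.List.pyGetD can 2 0 - 1) 0) ∨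
        (i = PySem.List.pyGetD can 0 0 ∧
          |j - PySem.List.pyGetD can 1 0| ≤ max (PySem.List.pyGetD can 2 0 - 1) 0)) := by
  rw [Bool.eq_iff_iff]
  simp only [pvCanHit, pvAnyHit, pvArmHit, List.any_eq_true, PySem.List.mem_pyRange_one,
    Bool.or_eq_true, Bool.and_eq_true, decide_eq_true_eq, abs_le]
  constructor
  · rintro (⟨hir, hjc⟩ | ⟨jj, ⟨hjj1, hjj2⟩, hcase⟩)
    · omega
    · omega
  · rintro (⟨hjc, hd1, hd2⟩ | ⟨hir, hd1, hd2⟩)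
    · rcases lt_trichotomy i (PySem.List.pyGetD can 0 0) with hlt | heq | hgt
      · exact Or.inr ⟨PySem.List.pyGetD can 0 0 - i, ⟨by omega, by omega⟩, by omega⟩
      · exact Or.inl ⟨heq, hjc⟩
      · exact Or.inr ⟨i - PySem.List.pyGetD can 0 0, ⟨by omega, by omega⟩, by omega⟩
    · rcases lt_trichotomy j (PySem.List.pyGetD can 1 0) with hlt | heq | hgt
      · exact Or.inr ⟨PySem.List.pyGetD can 1 0 - j, ⟨by omega, by omega⟩, by omega⟩
      · exact Or.inl ⟨hir, heq⟩
      · exact Or.inr ⟨j - PySem.List.pyGetD can 1 0, ⟨by omega, by omega⟩, by omega⟩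

-- one cell of the two counting loops: A counts a zero cell exactly when B's test is false
lemma pvCount_cell (b b' : Bool) (a : Int) (h : b = b') :
    (if ((if b then (1 : Int) else 0) == 0) = true then a + 1 else a)
      = (if b' = true then a else a + 1) := by
  subst h; cases b <;> simp

-- ===== VERDICT (by name: the statement is the Claim_ definition above) =====
theorem solution_spec : Claim_equal_solution := by
  intro wc N M _ hpre
  obtain ⟨hM, hcans⟩ := hpre
  have hcenters : ∀ i ∈ PySem.List.pyRange 0 M 1,
      0 ≤ PySem.List.pyGetD (PySem.List.pyGetD wc i []) 0 0 ∧
      PySem.List.pyGetD (PySem.List.pyGetD wc i []) 0 0 < N ∧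
      0 ≤ PySem.List.pyGetD (PySem.List.pyGetD wc i []) 1 0 ∧
      PySem.List.pyGetD (PySem.List.pyGetD wc i []) 1 0 < N := by
    intro i hi
    obtain ⟨hi0, hiM⟩ := PySem.List.mem_pyRange_one.1 hi
    have hilen : i < (wc.length : Int) := by omega
    have hgetc : PySem.List.pyGetD wc i [] = wc[i.toNat]'(by omega) :=
      PySem.List.pyGetD_eq_getElem wc [] hi0 hilen
    have htake : wc[i.toNat]'(by omega) ∈ wc.take M.toNat := by
      have hlt : i.toNat < (wc.take M.toNat).length := by
        rw [List.length_take]; omega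
      have := List.getElem_mem hlt
      rwa [List.getElem_take] at this
    obtain ⟨_, h1, h2, h3, h4⟩ := hcans _ htake
    rw [hgetc]
    exact ⟨h1, h2, h3, h4⟩
  obtain ⟨_, _, hcell⟩ := pvRepr_foldCans wc N (PySem.List.pyRange 0 M 1) hcenters
    _ _ (pvRepr_init N)
  unfold Spec_solution solution solution_alt
  dsimp only
  refine PySem.List.foldl_congr_mem _ _ _ _ (fun a i hi => ?_)
  obtain ⟨hi0, hiN⟩ := PySem.List.mem_pyRange_one.1 hi
  refine PySem.List.foldl_congr_mem _ _ _ _ (fun a j hj => ?_)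
  obtain ⟨hj0, hjN⟩ := PySem.List.mem_pyRange_one.1 hj
  have hcell' := hcell i j hi0 hiN hj0 hjN
  simp only [Bool.false_or] at hcell'
  rw [hcell']
  refine pvCount_cell _ _ a ?_
  refine PySem.List.any_congr_mem (fun k hk => ?_)
  obtain ⟨h1, h2, h3, h4⟩ := hcenters k hk
  exact pvCanHit_closed N _ i j hi0 hiN hj0 hjN h1 h2 h3 h4
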